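-- pv_equiv track=rewrite | github.com/erer-can/cmpe150-projects | image-tool/src/Main.py | sort_rows_border
-- ===== SOURCE A (Python) =====
-- def sort_rows_border(image_matrix):
--     def sort_segment(row, start, end):
--         segment = row[start:end]
--         segment.sort()
--         row[start:end] = segment
--
--     for row in image_matrix:
--         start = 0
--         for i in range(len(row)):
--             if row[i] == 0:
--                 if i > start:
--                     sort_segment(row, start, i)
--                 start = i + 1
--         if start < len(row):
--             sort_segment(row, start, len(row))
--
--     return image_matrix
-- ===== SOURCE B (Python) =====
-- def sort_rows_border(image_matrix):
--     # Decorate-sort-undecorate: give every element a bucket key (even buckets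
--     # for the non-zero segments, a fresh odd bucket for each zero) and do ONE
--     # stable sort of the whole keyed row; no per-segment sorting at all.
--     for row in image_matrix:
--         keyed = []
--         c = 0
--         for x in row:
--             if x == 0:
--                 c += 1
--                 keyed.append((2 * c - 1, x))
--             else:
--                 keyed.append((2 * c, x))
--         keyed.sort()
--         row[:] = [x for _, x in keyed]
--     return image_matrix
-- ===== Notes on version B (the rewrite author's own statement) =====
-- stated objective: alternative
-- what changed: Replaces A's start-pointer scan with per-segment in-place slice sorts by a decorate-sort-undecorate pass: each element gets a (bucket, value) key (even buckets for non-zero segments, a fresh odd bucket per zero) and one whole-row sort of the keyed list produces the row.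
import Mathlib
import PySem

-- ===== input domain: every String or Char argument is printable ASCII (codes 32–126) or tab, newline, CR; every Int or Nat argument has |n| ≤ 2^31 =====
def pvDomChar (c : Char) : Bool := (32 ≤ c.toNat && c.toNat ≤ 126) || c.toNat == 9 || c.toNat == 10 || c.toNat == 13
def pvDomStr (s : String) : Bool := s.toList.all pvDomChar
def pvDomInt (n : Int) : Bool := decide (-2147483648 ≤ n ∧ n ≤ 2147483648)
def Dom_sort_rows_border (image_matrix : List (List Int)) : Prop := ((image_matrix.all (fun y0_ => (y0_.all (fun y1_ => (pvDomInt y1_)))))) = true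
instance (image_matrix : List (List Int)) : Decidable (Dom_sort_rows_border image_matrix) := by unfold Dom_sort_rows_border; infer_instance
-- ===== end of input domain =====

-- B replaces A's per-segment in-place slice sorts by a decorate-sort-undecorate pass
-- (one whole-row sort of (bucket, value) keys); in Python both mutate the rows in place —
-- the equivalence proved here is about the returned matrix (the same object).

-- ===== PORT A =====
-- sort_segment(row, start, end): row[start:end] = sorted(row[start:end]); here start ≤ end
-- and both are in range, so the Python slice is take/drop.
def aSortSeg (row : List Int) (s e : Nat) : List Int :=
  row.take s ++ PySem.List.sorted ((row.drop s).take (e - s)) (fun z => z) false ++ row.drop e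

-- the inner 'for i in range(len(row))' loop with its mutable start pointer, plus the
-- trailing 'if start < len(row)' sort; fuel counts the remaining loop iterations
-- (initially len(row)), so i < row.length whenever fuel > 0 and row.getD i 0 reads row[i]
def aGo : Nat → List Int → Nat → Nat → List Int
  | 0, row, _, start => if start < row.length then aSortSeg row start row.length else row
  | fuel + 1, row, i, start =>
    if row.getD i 0 == 0 then
      if start < i then aGo fuel (aSortSeg row start i) (i + 1) (i + 1)
      else aGo fuel row (i + 1) (i + 1)
    else aGo fuel row (i + 1) start

def sort_rows_border (image_matrix : List (List Int)) : List (List Int) :=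
  image_matrix.map (fun row => aGo row.length row 0 0)

-- ===== PORT B =====
-- the decorating loop: c counts the zeros seen so far; a zero at count c+1 gets the odd
-- key 2*(c+1)-1, a non-zero element the even key 2*c of its segment
def bDec : List Int → Int → List (Int × Int)
  | [], _ => []
  | x :: xs, c =>
    if x == 0 then (2 * (c + 1) - 1, x) :: bDec xs (c + 1)
    else (2 * c, x) :: bDec xs c

-- keyed.sort() sorts int pairs lexicographically = PySem.List.sorted2 on (fst, snd)
def sort_rows_border_alt (image_matrix : List (List Int)) : List (List Int) :=
  image_matrix.map (fun row =>
    (PySem.List.sorted2 (bDec row 0) Prod.fst Prod.snd false).map Prod.snd)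

-- ===== PRECONDITION & SPEC =====
def Spec_sort_rows_border (image_matrix : List (List Int)) (out : List (List Int)) : Prop := out = sort_rows_border_alt image_matrix
instance (image_matrix : List (List Int)) (out : List (List Int)) : Decidable (Spec_sort_rows_border image_matrix out) := by unfold Spec_sort_rows_border; infer_instance

-- ===== CLAIM (what is proved, stated in full; the proofs are below) =====
def Claim_equal_sort_rows_border : Prop := ∀ (image_matrix : List (List Int)), Dom_sort_rows_border image_matrix → Spec_sort_rows_border image_matrix (sort_rows_border image_matrix)

-- ===== LEMMAS AND PROOFS =====

-- common specification: process `rest` with a pending (not yet sorted) non-zero segment `seg`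
def gSpec : List Int → List Int → List Int
  | seg, [] => PySem.List.sorted seg (fun z => z) false
  | seg, y :: rs =>
    if y == 0 then PySem.List.sorted seg (fun z => z) false ++ y :: gSpec [] rs
    else gSpec (seg ++ [y]) rs
termination_by _ rest => rest.length

-- the in-place segment sort splits the row as prefix / sorted segment / tail
theorem aSortSeg_split (done seg tail : List Int) :
    aSortSeg (done ++ seg ++ tail) done.length (done.length + seg.length)
      = done ++ PySem.List.sorted seg (fun z => z) false ++ tail := by
  unfold aSortSeg
  simp

theorem aGo_eq_gSpec (rest : List Int) : ∀ done seg : List Int,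
    aGo rest.length (done ++ seg ++ rest) (done.length + seg.length) done.length
      = done ++ gSpec seg rest := by
  induction rest with
  | nil =>
    intro done seg
    rw [show ([] : List Int).length = 0 from rfl, aGo]
    by_cases hseg : seg = []
    · subst hseg
      simp [gSpec, PySem.List.sorted]
    · rw [if_pos (by simpa using List.length_pos_iff.mpr hseg)]
      have h := aSortSeg_split done seg []
      simp only [List.append_nil] at h ⊢
      rw [show (done ++ seg).length = done.length + seg.length from by simp, h]
      simp [gSpec]
  | cons y rs ih =>
    intro done seg
    rw [show (y :: rs).length = rs.length + 1 from rfl, aGo]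
    have hget : (done ++ seg ++ y :: rs).getD (done.length + seg.length) 0 = y := by
      rw [show done ++ seg ++ y :: rs = (done ++ seg) ++ y :: rs from by simp,
          show done.length + seg.length = (done ++ seg).length from by simp]
      simp [List.getD_eq_getElem?_getD]
    rw [hget]
    by_cases hy : (y == 0) = true
    · rw [if_pos hy]
      by_cases hseg : seg = []
      · subst hseg
        rw [if_neg (by simp)]
        have h := ih (done ++ [y]) []
        rw [show done ++ [y] ++ [] ++ rs = done ++ [] ++ y :: rs from by simp] at h
        simp only [List.length_append, List.length_cons, List.length_nil, Nat.add_zero] at h ⊢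
        rw [h]
        simp [gSpec, hy, PySem.List.sorted]
      · rw [if_pos (by simpa using List.length_pos_iff.mpr hseg)]
        rw [aSortSeg_split done seg (y :: rs)]
        have h := ih (done ++ PySem.List.sorted seg (fun z => z) false ++ [y]) []
        simp only [List.append_nil, List.length_append, List.length_cons, List.length_nil,
          PySem.List.length_sorted] at h
        rw [show done ++ PySem.List.sorted seg (fun z => z) false ++ [y] ++ rs
              = done ++ PySem.List.sorted seg (fun z => z) false ++ y :: rs from by simp] at h
        rw [show done.length + seg.length + 1 + 0 = done.length + seg.length + 1 from by omega] at h
        rw [h]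
        simp [gSpec, hy]
    · rw [if_neg hy]
      have h := ih done (seg ++ [y])
      simp only [List.length_append, List.length_cons, List.length_nil] at h
      rw [show done ++ (seg ++ [y]) ++ rs = done ++ seg ++ y :: rs from by simp] at h
      rw [show done.length + (seg.length + 1) = done.length + seg.length + 1 from by omega] at h
      rw [h]
      simp [gSpec, hy]

-- ---------- B side ----------

-- lexicographic ≤ on int pairs: the order keyed.sort() arranges the keyed row by
def lexLe (a b : Int × Int) : Prop := a.1 < b.1 ∨ (a.1 = b.1 ∧ a.2 ≤ b.2)

-- the comparator sorted2 … Prod.fst Prod.snd false inserts by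
def bLt (a b : Int × Int) : Bool :=
  decide (a.1 < b.1) || (!decide (b.1 < a.1) && decide (a.2 < b.2))

theorem bLt_false_iff (a b : Int × Int) : bLt b a = false ↔ lexLe a b := by
  unfold bLt lexLe
  rcases a with ⟨a1, a2⟩; rcases b with ⟨b1, b2⟩
  simp only [Bool.or_eq_false_iff, Bool.and_eq_false_iff, decide_eq_false_iff_not]
  constructor
  · rintro ⟨h1, h2 | h2⟩ <;> simp at * <;> omega
  · rintro (h | ⟨h1, h2⟩) <;> constructor <;> simp <;> omega

theorem lexLe_trans {a b c : Int × Int} (h1 : lexLe a b) (h2 : lexLe b c) : lexLe a c := by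
  unfold lexLe at *; omega

theorem insertBy_bLt_pairwise (x : Int × Int) (l : List (Int × Int))
    (h : l.Pairwise lexLe) : (PySem.List.insertBy bLt x l).Pairwise lexLe := by
  induction l with
  | nil => simp [PySem.List.insertBy]
  | cons y ys ih =>
    rw [PySem.List.insertBy]
    rcases List.pairwise_cons.mp h with ⟨hy, hys⟩
    by_cases hb : bLt x y = true
    · rw [if_pos hb]
      have hxy : lexLe x y := by
        unfold bLt at hb; unfold lexLe
        rcases x with ⟨x1, x2⟩; rcases y with ⟨y1, y2⟩
        simp only [Bool.or_eq_true, Bool.and_eq_true, Bool.not_eq_true', decide_eq_true_eq,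
          decide_eq_false_iff_not] at hb
        omega
      refine List.pairwise_cons.mpr ⟨?_, h⟩
      intro z hz
      rcases List.mem_cons.mp hz with rfl | hz
      · exact hxy
      · exact lexLe_trans hxy (hy z hz)
    · rw [if_neg hb]
      have hyx : lexLe y x := (bLt_false_iff y x).mp (Bool.eq_false_iff.mpr hb)
      refine List.pairwise_cons.mpr ⟨?_, ih hys⟩
      intro z hz
      rcases (PySem.List.mem_insertBy bLt x z ys).mp hz with rfl | hz
      · exact hyx
      · exact hy z hz

theorem sorted2_pairwise_lexLe (xs : List (Int × Int)) :
    (PySem.List.sorted2 xs Prod.fst Prod.snd false).Pairwise lexLe := by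
  have key : ∀ acc : List (Int × Int), acc.Pairwise lexLe →
      (xs.foldl (fun acc x => PySem.List.insertBy bLt x acc) acc).Pairwise lexLe := by
    induction xs with
    | nil => intro acc h; simpa using h
    | cons x xs ih =>
      intro acc h
      exact ih _ (insertBy_bLt_pairwise x acc h)
  have : PySem.List.sorted2 xs Prod.fst Prod.snd false
      = xs.foldl (fun acc x => PySem.List.insertBy bLt x acc) [] := by
    unfold PySem.List.sorted2 bLt
    rfl
  rw [this]
  exact key [] (by simp)

-- the intended keyed result: the sorted pending segment carries key 2*c, a zero the odd
-- key 2*c+1, and later segments larger keys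
def tSpec (c : Int) : List Int → List Int → List (Int × Int)
  | seg, [] => (PySem.List.sorted seg (fun z => z) false).map (fun v => (2 * c, v))
  | seg, y :: rs =>
    if y == 0 then
      (PySem.List.sorted seg (fun z => z) false).map (fun v => (2 * c, v))
        ++ (2 * c + 1, y) :: tSpec (c + 1) [] rs
    else tSpec c (seg ++ [y]) rs
termination_by _ rest => rest.length

theorem map_snd_tSpec (rest : List Int) : ∀ (c : Int) (seg : List Int),
    (tSpec c seg rest).map Prod.snd = gSpec seg rest := by
  induction rest with
  | nil => intro c seg; simp [tSpec, gSpec]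
  | cons y rs ih =>
    intro c seg
    by_cases hy : (y == 0) = true
    · simp [tSpec, gSpec, hy, ih]
    · simp [tSpec, gSpec, hy, ih]

theorem tSpec_perm (rest : List Int) : ∀ (c : Int) (seg : List Int),
    (tSpec c seg rest).Perm (seg.map (fun v => (2 * c, v)) ++ bDec rest c) := by
  induction rest with
  | nil =>
    intro c seg
    simpa [tSpec, bDec] using
      ((PySem.List.sorted_perm seg (fun z => z) false).map (fun v => (2 * c, v)))
  | cons y rs ih =>
    intro c seg
    by_cases hy : (y == 0) = true
    · rw [show tSpec c seg (y :: rs)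
            = (PySem.List.sorted seg (fun z => z) false).map (fun v => (2 * c, v))
              ++ (2 * c + 1, y) :: tSpec (c + 1) [] rs from by simp [tSpec, hy]]
      rw [show bDec (y :: rs) c = (2 * (c + 1) - 1, y) :: bDec rs (c + 1) from by
            simp [bDec, hy]]
      have h1 : ((PySem.List.sorted seg (fun z => z) false).map
          (fun v => (2 * c, v))).Perm (seg.map (fun v => (2 * c, v))) :=
        (PySem.List.sorted_perm seg (fun z => z) false).map _
      have h2 : ((2 * c + 1, y) :: tSpec (c + 1) [] rs).Perm
          ((2 * (c + 1) - 1, y) :: bDec rs (c + 1)) := by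
        rw [show (2 * (c + 1) - 1 : Int) = 2 * c + 1 from by ring]
        exact List.Perm.cons _ (by simpa using ih (c + 1) [])
      exact h1.append h2
    · rw [show tSpec c seg (y :: rs) = tSpec c (seg ++ [y]) rs from by simp [tSpec, hy]]
      rw [show bDec (y :: rs) c = (2 * c, y) :: bDec rs c from by simp [bDec, hy]]
      have h := ih c (seg ++ [y])
      simpa using h

theorem tSpec_key_ge (rest : List Int) : ∀ (c : Int) (seg : List Int),
    ∀ p ∈ tSpec c seg rest, 2 * c ≤ p.1 := by
  induction rest with
  | nil =>
    intro c seg p hp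
    rcases List.mem_map.mp (by simpa [tSpec] using hp) with ⟨v, _, rfl⟩
    simp
  | cons y rs ih =>
    intro c seg p hp
    by_cases hy : (y == 0) = true
    · rw [show tSpec c seg (y :: rs)
            = (PySem.List.sorted seg (fun z => z) false).map (fun v => (2 * c, v))
              ++ (2 * c + 1, y) :: tSpec (c + 1) [] rs from by simp [tSpec, hy]] at hp
      rcases List.mem_append.mp hp with hp | hp
      · rcases List.mem_map.mp hp with ⟨v, _, rfl⟩; simp
      · rcases List.mem_cons.mp hp with rfl | hp
        · simp
        · have := ih (c + 1) [] p hp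
          omega
    · rw [show tSpec c seg (y :: rs) = tSpec c (seg ++ [y]) rs from by simp [tSpec, hy]] at hp
      exact ih c (seg ++ [y]) p hp

theorem tSpec_pairwise (rest : List Int) : ∀ (c : Int) (seg : List Int),
    (tSpec c seg rest).Pairwise lexLe := by
  induction rest with
  | nil =>
    intro c seg
    rw [show tSpec c seg []
          = (PySem.List.sorted seg (fun z => z) false).map (fun v => (2 * c, v)) from by
        simp [tSpec]]
    refine List.pairwise_map.mpr ?_
    exact (PySem.List.sorted_pairwise seg (fun z => z)).imp (fun h => by
      unfold lexLe; right; exact ⟨rfl, h⟩)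
  | cons y rs ih =>
    intro c seg
    by_cases hy : (y == 0) = true
    · rw [show tSpec c seg (y :: rs)
            = (PySem.List.sorted seg (fun z => z) false).map (fun v => (2 * c, v))
              ++ (2 * c + 1, y) :: tSpec (c + 1) [] rs from by simp [tSpec, hy]]
      refine List.pairwise_append.mpr ⟨?_, ?_, ?_⟩
      · refine List.pairwise_map.mpr ?_
        exact (PySem.List.sorted_pairwise seg (fun z => z)).imp (fun h => by
          unfold lexLe; right; exact ⟨rfl, h⟩)
      · refine List.pairwise_cons.mpr ⟨?_, ih (c + 1) []⟩
        intro p hp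
        have := tSpec_key_ge rs (c + 1) [] p hp
        unfold lexLe; omega
      · intro a ha b hb
        rcases List.mem_map.mp ha with ⟨v, _, rfl⟩
        rcases List.mem_cons.mp hb with rfl | hb
        · unfold lexLe; left; simp
        · have := tSpec_key_ge rs (c + 1) [] b hb
          unfold lexLe; left; omega
    · rw [show tSpec c seg (y :: rs) = tSpec c (seg ++ [y]) rs from by simp [tSpec, hy]]
      exact ih c (seg ++ [y])

theorem sorted2_bDec_eq_tSpec (row : List Int) :
    PySem.List.sorted2 (bDec row 0) Prod.fst Prod.snd false = tSpec 0 [] row := by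
  refine List.Perm.eq_of_pairwise (le := lexLe) ?_ ?_ ?_ ?_
  · rintro ⟨a1, a2⟩ ⟨b1, b2⟩ _ _ h1 h2
    unfold lexLe at h1 h2
    simp only [Prod.mk.injEq]
    omega
  · exact sorted2_pairwise_lexLe (bDec row 0)
  · exact tSpec_pairwise row 0 []
  · exact (PySem.List.sorted2_perm (bDec row 0) Prod.fst Prod.snd false).trans
      (by simpa using (tSpec_perm row 0 []).symm)

-- ===== VERDICT (by name: the statement is the Claim_ definition above) =====
theorem sort_rows_border_spec : Claim_equal_sort_rows_border := by
  intro m _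
  unfold Spec_sort_rows_border sort_rows_border sort_rows_border_alt
  apply List.map_congr_left
  intro row _
  rw [sorted2_bDec_eq_tSpec, map_snd_tSpec]
  simpa using aGo_eq_gSpec row [] []
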